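-- pv_equiv track=rewrite | github.com/AlexanderJCS/advent-of-code-2023 | day-12/part_1.py | has_too_many_in_row
-- ===== SOURCE A (Python) =====
-- def has_too_many_in_row(line: list[str], max_hashtags: int) -> bool:
--     """
--     :return: True if the number of hashtags in a row is greater than the maximum
--     """
--     if line[-2] == ".":
--         pass
--
--     num_in_row = 0
--     for element in line:
--         if element == "#":
--             num_in_row += 1
--
--         elif element != "#":
--             num_in_row = 0
--
--         if num_in_row > max_hashtags:
--             return True
--
--     return False
-- ===== SOURCE B (Python) =====
-- def has_too_many_in_row(line: list[str], max_hashtags: int) -> bool: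
--     """True iff the longest run of consecutive "#" elements exceeds max_hashtags."""
--     longest = 0
--     i, n = 0, len(line)
--     while i < n:
--         j = i
--         while j < n and line[j] == "#":
--             j += 1
--         longest = max(longest, j - i)
--         i = j + 1  # step past the run and the non-"#" separator that ended it
--     return longest > max_hashtags
-- ===== Notes on version B (the rewrite author's own statement) =====
-- stated objective: alternative
-- what changed: Replaces A's resetting counter with early return by an explicit run-grouping scan that extracts each maximal run of '#', keeps the longest, and makes one final comparison against max_hashtags.
-- crash fix: On lines with fewer than 2 elements A raises IndexError from its dead guard line[-2]; B returns whether the longest '#' run (0 for such lines) exceeds max_hashtags. — e.g. on has_too_many_in_row(["#"], 0): A raises IndexError, B returns true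
import Mathlib
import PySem

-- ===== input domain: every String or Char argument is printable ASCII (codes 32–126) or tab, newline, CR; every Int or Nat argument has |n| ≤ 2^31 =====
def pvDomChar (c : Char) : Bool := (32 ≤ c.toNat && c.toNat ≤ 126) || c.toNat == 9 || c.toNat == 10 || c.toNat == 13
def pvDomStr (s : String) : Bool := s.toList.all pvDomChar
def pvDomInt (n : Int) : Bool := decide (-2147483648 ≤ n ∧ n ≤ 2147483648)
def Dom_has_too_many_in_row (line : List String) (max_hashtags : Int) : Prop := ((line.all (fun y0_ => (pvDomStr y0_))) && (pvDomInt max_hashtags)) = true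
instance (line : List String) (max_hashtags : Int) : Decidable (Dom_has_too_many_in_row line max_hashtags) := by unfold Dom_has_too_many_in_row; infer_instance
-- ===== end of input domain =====

-- B replaces A's resetting counter + early return by explicit run grouping: it finds each
-- maximal run of "#" and compares only the longest run against max_hashtags.

-- ===== PORT A =====
-- the for-loop of A: counter resets on non-"#", early True once the counter exceeds the max
def pvLoopA (max_hashtags : Int) : List String → Int → Bool
  | [], _ => false
  | element :: rest, num_in_row =>
    let n := if element == "#" then num_in_row + 1 else 0
    if n > max_hashtags then true else pvLoopA max_hashtags rest n

def has_too_many_in_row (line : List String) (max_hashtags : Int) : Bool :=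
  -- `if line[-2] == ".": pass` — its only effect is an IndexError when len(line) < 2
  match PySem.List.pyGet? line (-2) with
  | none => false            -- IndexError in Python; these inputs lie outside Pre_
  | some _ => pvLoopA max_hashtags line 0

-- ===== PORT B =====
-- length of the leading run of "#" (the inner `while j < n and line[j] == "#"` scan)
def pvRunLen : List String → Nat
  | [] => 0
  | e :: rest => if e == "#" then pvRunLen rest + 1 else 0

-- outer while loop: record each run's length, then jump past the run and its separator;
-- the fuel (initially the list length, always ≥ it) only makes the recursion structural
def pvLongestRunGo : Nat → List String → Nat
  | _, [] => 0
  | 0, _ :: _ => 0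
  | fuel + 1, e :: rest =>
      let k := pvRunLen (e :: rest)
      max k (pvLongestRunGo fuel ((e :: rest).drop (k + 1)))

def pvLongestRun (line : List String) : Nat := pvLongestRunGo line.length line

def has_too_many_in_row_alt (line : List String) (max_hashtags : Int) : Bool :=
  decide ((pvLongestRun line : Int) > max_hashtags)

-- ===== PRECONDITION & SPEC =====
-- Pre_ excludes exactly the lines of length < 2, on which A's guard `line[-2]` raises IndexError.
def Pre_has_too_many_in_row (line : List String) (max_hashtags : Int) : Prop := 2 ≤ line.length
instance (line : List String) (max_hashtags : Int) : Decidable (Pre_has_too_many_in_row line max_hashtags) := by unfold Pre_has_too_many_in_row; infer_instance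
def pvWitness_has_too_many_in_row : List String × Int := (["#", ".", "#", "#"], 1)

-- On lines with fewer than 2 elements A raises IndexError from its dead guard line[-2];
-- B returns whether the longest '#' run (0 for such lines) exceeds max_hashtags.
def Raises_has_too_many_in_row (line : List String) (max_hashtags : Int) : Prop := line.length < 2
instance (line : List String) (max_hashtags : Int) : Decidable (Raises_has_too_many_in_row line max_hashtags) := by unfold Raises_has_too_many_in_row; infer_instance
def pvRaiseWitness_has_too_many_in_row : List String × Int := (["#"], 0)
def pvRaiseWitnessOut_has_too_many_in_row : Bool := true

def Spec_has_too_many_in_row (line : List String) (max_hashtags : Int) (out : Bool) : Prop := out = has_too_many_in_row_alt line max_hashtags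
instance (line : List String) (max_hashtags : Int) (out : Bool) : Decidable (Spec_has_too_many_in_row line max_hashtags out) := by unfold Spec_has_too_many_in_row; infer_instance

-- ===== CLAIM (what is proved, stated in full; the proofs are below) =====
def Claim_equal_has_too_many_in_row : Prop := ∀ (line : List String) (max_hashtags : Int), Dom_has_too_many_in_row line max_hashtags → Pre_has_too_many_in_row line max_hashtags → Spec_has_too_many_in_row line max_hashtags (has_too_many_in_row line max_hashtags)
def Claim_raises_has_too_many_in_row : Prop := (∀ (line : List String) (max_hashtags : Int), Dom_has_too_many_in_row line max_hashtags → Raises_has_too_many_in_row line max_hashtags → ¬ Pre_has_too_many_in_row line max_hashtags) ∧ (Dom_has_too_many_in_row (pvRaiseWitness_has_too_many_in_row.1) (pvRaiseWitness_has_too_many_in_row.2) ∧ Raises_has_too_many_in_row (pvRaiseWitness_has_too_many_in_row.1) (pvRaiseWitness_has_too_many_in_row.2) ∧ has_too_many_in_row_alt (pvRaiseWitness_has_too_many_in_row.1) (pvRaiseWitness_has_too_many_in_row.2) = pvRaiseWitnessOut_has_too_many_in_row)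

-- ===== LEMMAS AND PROOFS =====

-- A's loop, starting below the max, equals "this run pushes past the max, or the loop restarted after it does"
theorem pvLoopA_run (m : Int) (hm : 0 ≤ m) :
    ∀ (l : List String) (c : Int), c ≤ m →
      pvLoopA m l c =
        (decide (c + (pvRunLen l : Int) > m) || pvLoopA m (l.drop (pvRunLen l + 1)) 0) := by
  intro l
  induction l with
  | nil =>
      intro c hc
      simp [pvLoopA, pvRunLen]
      omega
  | cons e rest ih =>
      intro c hc
      by_cases he : e == "#"
      · simp only [pvRunLen, pvLoopA, he, if_pos]
        by_cases h1 : c + 1 > m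
        · have hk : c + ((pvRunLen rest : Int) + 1) > m := by
            have : (0:Int) ≤ (pvRunLen rest : Int) := Int.natCast_nonneg _
            omega
          push_cast
          simp only [if_pos h1]
          have : decide (c + ((pvRunLen rest : Int) + 1) > m) = true := by
            simpa using hk
          rw [this, Bool.true_or]
        · have h1' : c + 1 ≤ m := by omega
          simp only [if_neg h1]
          rw [ih (c + 1) h1']
          have hd : rest.drop (pvRunLen rest + 1) = (e :: rest).drop (pvRunLen rest + 1 + 1) := by
            simp [List.drop]
          rw [hd]
          congr 2
          · congr 1
            push_cast
            ring
      · have hif : ((e == "#") = false) := by simpa using he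
        simp only [pvRunLen, pvLoopA, hif]
        have h0 : ¬ ((0:Int) > m) := by omega
        have hc' : ¬ (c + ((0:Nat) : Int) > m) := by push_cast; omega
        simp [h0, List.drop_succ_cons]
        intro h
        exact absurd h (by omega)

-- main bridge for 0 ≤ m: A's loop from 0 computes "longest run > m"
theorem pvLoopA_eq_longest (m : Int) (hm : 0 ≤ m) :
    ∀ (fuel : Nat) (l : List String), l.length ≤ fuel →
      pvLoopA m l 0 = decide ((pvLongestRunGo fuel l : Int) > m) := by
  intro fuel
  induction fuel with
  | zero =>
      intro l hl
      have : l = [] := List.length_eq_zero_iff.mp (Nat.le_zero.mp hl)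
      subst this
      simp [pvLoopA, pvLongestRunGo]
      omega
  | succ n ih =>
      intro l hl
      match l with
      | [] =>
          simp [pvLoopA, pvLongestRunGo]
          omega
      | e :: rest =>
          rw [pvLoopA_run m hm (e :: rest) 0 hm]
          rw [pvLongestRunGo]
          have hlen : ((e :: rest).drop (pvRunLen (e :: rest) + 1)).length ≤ n := by
            simp only [List.length_drop, List.length_cons] at *
            omega
          rw [ih _ hlen]
          simp only [Int.zero_add, Nat.cast_max, gt_iff_lt, lt_max_iff, Bool.decide_or]

-- for m < 0 both sides are True on any nonempty line
theorem pvLoopA_neg (m : Int) (hm : m < 0) (e : String) (rest : List String) :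
    pvLoopA m (e :: rest) 0 = true := by
  by_cases he : e == "#" <;> simp [pvLoopA, he] <;> omega

-- ===== VERDICT (by name: the statement is the Claim_ definition above) =====
theorem has_too_many_in_row_spec : Claim_equal_has_too_many_in_row := by
  intro line m _ hpre
  unfold Spec_has_too_many_in_row has_too_many_in_row has_too_many_in_row_alt
  unfold Pre_has_too_many_in_row at hpre
  match line, hpre with
  | a :: b :: rest, _ =>
    have hg : ∃ v, PySem.List.pyGet? (a :: b :: rest) (-2) = some v := by
      simp [PySem.List.pyGet?, PySem.List.pyIdx?]
    obtain ⟨v, hv⟩ := hg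
    rw [hv]
    rcases (by omega : 0 ≤ m ∨ m < 0) with hm | hm
    · rw [pvLoopA_eq_longest m hm (a :: b :: rest).length (a :: b :: rest) le_rfl]
      rfl
    · rw [pvLoopA_neg m hm]
      have : ((pvLongestRun (a :: b :: rest) : Int) > m) := by
        have : (0:Int) ≤ (pvLongestRun (a :: b :: rest) : Int) := Int.natCast_nonneg _
        omega
      simp [this]

@[simp] theorem has_too_many_in_row_raises : Claim_raises_has_too_many_in_row := by
  unfold Claim_raises_has_too_many_in_row
  constructor
  · intro line m _ hr
    unfold Raises_has_too_many_in_row at hr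
    unfold Pre_has_too_many_in_row
    omega
  · exact ⟨by decide, by decide, by decide⟩
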